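-- pv_equiv track=rewrite | github.com/Erchak/Proyectos-Python | Proyectos_Python/Simulador_de_Mazo_de_Cartas/Simulador_de_Mazo_de_Cartas.py | draw_card
-- ===== SOURCE A (Python) =====
-- def draw_card(deck, num_cards):
--     hand = []  # Lista para almacenar las cartas extraídas.
--     for _ in range(num_cards):
--         if deck:  # Verificamos que queden cartas disponibles en el mazo.
--             card = deck.pop()  # Extraemos la última carta del mazo.
--             hand.append(card)  # Agregamos la carta a la mano del jugador.
--         else:
--             break  # Si no quedan cartas, salimos del bucle.
--     return hand, deck  # Devolvemos la mano y el mazo actualizado.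
-- ===== SOURCE B (Python) =====
-- def draw_card(deck, num_cards):
--     n = min(max(num_cards, 0), len(deck))
--     cut = len(deck) - n
--     hand = deck[cut:][::-1]
--     del deck[cut:]
--     return hand, deck
-- ===== Notes on version B (the rewrite author's own statement) =====
-- stated objective: simpler
-- what changed: Replaces the per-card pop loop with a guard by computing the drawn count once (clamped min) and taking/reversing one bulk slice off the end of the deck, mutating the same deck object with a single del.
import Mathlib
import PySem

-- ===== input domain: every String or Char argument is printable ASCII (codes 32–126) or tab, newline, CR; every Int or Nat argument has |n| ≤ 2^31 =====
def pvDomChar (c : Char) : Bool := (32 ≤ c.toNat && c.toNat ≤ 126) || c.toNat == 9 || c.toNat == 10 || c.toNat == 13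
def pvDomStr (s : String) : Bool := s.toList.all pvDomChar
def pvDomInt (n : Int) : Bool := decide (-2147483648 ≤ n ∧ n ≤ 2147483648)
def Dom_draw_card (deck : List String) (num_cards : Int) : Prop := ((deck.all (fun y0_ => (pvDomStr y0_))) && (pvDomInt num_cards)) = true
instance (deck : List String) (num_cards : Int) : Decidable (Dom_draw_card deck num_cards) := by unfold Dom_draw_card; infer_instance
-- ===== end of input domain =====

-- B replaces A's per-card pop loop by computing the clamped draw count once and taking one
-- reversed bulk slice off the deck's end (objective: simpler); B mutates the same deck object in place like A.

-- ===== PORT A =====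
-- A: loop range(num_cards); each step pops the last card (getLast/dropLast) into hand, break on empty deck
def drawLoopA : Nat → List String → List String → List String × List String
  | 0, deck, hand => (hand, deck)
  | k+1, deck, hand =>
    if h : deck = [] then (hand, deck)
    else drawLoopA k deck.dropLast (hand ++ [deck.getLast h])

def draw_card (deck : List String) (num_cards : Int) : List String × List String :=
  drawLoopA num_cards.toNat deck []

-- ===== PORT B =====
-- B: compute the clamped draw count once, then one bulk slice-and-reverse plus a del of the tail
def draw_card_alt (deck : List String) (num_cards : Int) : List String × List String :=
  let len : Int := deck.length
  let n : Int := min (max num_cards 0) len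
  let cut : Nat := (len - n).toNat
  ((deck.drop cut).reverse, deck.take cut)

-- ===== PRECONDITION & SPEC =====
def Spec_draw_card (deck : List String) (num_cards : Int) (out : List String × List String) : Prop := out = draw_card_alt deck num_cards
instance (deck : List String) (num_cards : Int) (out : List String × List String) : Decidable (Spec_draw_card deck num_cards out) := by unfold Spec_draw_card; infer_instance

-- ===== CLAIM (what is proved, stated in full; the proofs are below) =====
def Claim_equal_draw_card : Prop := ∀ (deck : List String) (num_cards : Int), Dom_draw_card deck num_cards → Spec_draw_card deck num_cards (draw_card deck num_cards)

-- ===== LEMMAS AND PROOFS =====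
theorem drawLoopA_eq (k : Nat) (deck hand : List String) :
    drawLoopA k deck hand =
      (hand ++ (deck.drop (deck.length - min k deck.length)).reverse,
       deck.take (deck.length - min k deck.length)) := by
  induction k generalizing deck hand with
  | zero => simp [drawLoopA]
  | succ k ih =>
    rcases deck.eq_nil_or_concat with rfl | ⟨ys, y, rfl⟩
    · simp [drawLoopA]
    · have hne : ys ++ [y] ≠ [] := by simp
      rw [drawLoopA]
      simp only [List.concat_eq_append]
      rw [dif_neg hne]
      rw [List.dropLast_concat, List.getLast_concat, ih]
      have hlen : (ys ++ [y]).length = ys.length + 1 := by simp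
      have hm : (ys ++ [y]).length - min (k+1) (ys ++ [y]).length
          = ys.length - min k ys.length := by omega
      rw [hm]
      have hk : ys.length - min k ys.length ≤ ys.length := by omega
      rw [List.drop_append_of_le_length hk, List.take_append_of_le_length hk]
      simp


-- ===== VERDICT (by name: the statement is the Claim_ definition above) =====
theorem draw_card_spec : Claim_equal_draw_card := by
  intro deck num_cards _
  show draw_card deck num_cards = draw_card_alt deck num_cards
  simp only [draw_card, draw_card_alt]
  rw [drawLoopA_eq]
  have h1 : ((deck.length : Int) - min (max num_cards 0) (deck.length : Int)).toNat
      = deck.length - min num_cards.toNat deck.length := by omega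
  rw [h1]
  simp
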